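-- pv_equiv track=rewrite | github.com/aorangehc/Daily-coding | 字节豆包MarsCode-青训营-寒假专场/codes/Python/红包运气排行榜.py | solution
-- ===== SOURCE A (Python) =====
-- def solution(n: int, s: list, x: list) -> list:
--     # 创建一个字典来记录每个人的总金额
--     amount_dict = {}
--
--     for i in range(n):
--         name = s[i]
--         amount = x[i]
--         if name in amount_dict:
--             amount_dict[name] += amount
--         else:
--             amount_dict[name] = amount
--
--     # 创建一个包含参与者信息的列表，每个元素是一个元组 (name, total_amount, first_index)
--     participants = [(name, amount_dict[name], s.index(name)) for name in amount_dict]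
--
--     # 使用sorted函数进行排序，自定义排序规则
--     sorted_participants = sorted(participants, key=lambda p: (-p[1], p[2]))
--
--     # 提取排序后的名字列表
--     result = [p[0] for p in sorted_participants]
--
--     return result
-- ===== SOURCE B (Python) =====
-- def solution(n: int, s: list, x: list) -> list:
--     # Aggregate totals, then BUCKET names by total and emit buckets in
--     # descending total order: no comparison sort of participant records and
--     # no s.index scan; the tie-break comes from bucket append order.
--     totals = {}
--     for i in range(n):
--         totals[s[i]] = totals.get(s[i], 0) + x[i]
--     buckets = {}
--     for name, tot in totals.items():
--         buckets.setdefault(tot, []).append(name)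
--     return [name for tot in sorted(buckets, reverse=True) for name in buckets[tot]]
-- ===== Notes on version B (the rewrite author's own statement) =====
-- stated objective: faster
-- what changed: B replaces A's comparison sort of (name, total, first_index) records (with an O(n) s.index scan per distinct name) by bucketing: names are grouped into a total->names dict in first-appearance order, only the distinct totals are sorted descending, and the buckets are concatenated; no first index is ever computed.
import Mathlib
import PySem

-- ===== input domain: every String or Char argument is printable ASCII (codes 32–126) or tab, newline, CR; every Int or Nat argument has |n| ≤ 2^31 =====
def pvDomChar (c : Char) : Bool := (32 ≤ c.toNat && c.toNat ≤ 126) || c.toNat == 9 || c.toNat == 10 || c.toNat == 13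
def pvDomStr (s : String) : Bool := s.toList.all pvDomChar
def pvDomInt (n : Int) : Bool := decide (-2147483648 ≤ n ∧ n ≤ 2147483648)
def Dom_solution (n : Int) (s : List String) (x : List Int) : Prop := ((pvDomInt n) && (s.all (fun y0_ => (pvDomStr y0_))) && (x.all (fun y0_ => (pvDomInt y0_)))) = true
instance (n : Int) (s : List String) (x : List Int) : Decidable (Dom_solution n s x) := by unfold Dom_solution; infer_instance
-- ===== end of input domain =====

-- B replaces A's comparison sort of (name, total, first_index) records (and its per-key
-- s.index scan) by bucketing: names are grouped by total in first-appearance order, the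
-- distinct totals are sorted descending, and the buckets are concatenated.

-- ===== PORT A =====
def solution (n : Int) (s : List String) (x : List Int) : List String :=
  let amountDict := (PySem.List.pyRange 0 n).foldl (fun d i =>
    let name := PySem.List.pyGetD s i ""
    let amount := PySem.List.pyGetD x i 0
    if d.contains name then d.modify name 0 (· + amount) else d.insert name amount)
    PySem.Dict.empty
  let participants := amountDict.keys.map (fun name =>
    (name, amountDict.getD name 0, (PySem.List.index? s name).getD 0))
  let sortedParticipants := PySem.List.sorted2 participants (fun p => -p.2.1) (fun p => p.2.2)
  sortedParticipants.map (fun p => p.1)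

-- ===== PORT B =====
def solution_alt (n : Int) (s : List String) (x : List Int) : List String :=
  let totals := (PySem.List.pyRange 0 n).foldl (fun d i =>
    d.insert (PySem.List.pyGetD s i "")
      (d.getD (PySem.List.pyGetD s i "") 0 + PySem.List.pyGetD x i 0))
    PySem.Dict.empty
  let buckets := totals.items.foldl (fun b p =>
    b.modify p.2 ([] : List String) (fun l => l ++ [p.1])) PySem.Dict.empty
  (PySem.List.sorted buckets.keys (fun t => t) true).flatMap (fun t => buckets.getD t [])

-- ===== PRECONDITION & SPEC =====
-- Python A raises IndexError when some i in range(n) is out of range of s or x; exactly those inputs are excluded.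
def Pre_solution (n : Int) (s : List String) (x : List Int) : Prop :=
  n ≤ (s.length : Int) ∧ n ≤ (x.length : Int)
instance (n : Int) (s : List String) (x : List Int) : Decidable (Pre_solution n s x) := by unfold Pre_solution; infer_instance
def pvWitness_solution : Int × List String × List Int := (3, ["b", "a", "b"], [1, 5, 2])
def Spec_solution (n : Int) (s : List String) (x : List Int) (out : List String) : Prop := out = solution_alt n s x
instance (n : Int) (s : List String) (x : List Int) (out : List String) : Decidable (Spec_solution n s x out) := by unfold Spec_solution; infer_instance

-- ===== CLAIM (what is proved, stated in full; the proofs are below) =====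
def Claim_equal_solution : Prop := ∀ (n : Int) (s : List String) (x : List Int), Dom_solution n s x → Pre_solution n s x → Spec_solution n s x (solution n s x)

-- ===== LEMMAS AND PROOFS =====

-- ---- A-side: the tuple sort with key (-total, first_index) is the stable sort of the
-- ---- first-appearance-ordered key list by -total alone.

theorem pv_idxOf?_mem (y : String) (l : List String) (h : y ∈ l) :
    List.idxOf? y l = some (l.idxOf y) := by
  induction l with
  | nil => simp at h
  | cons a t ih =>
      by_cases hy : a = y
      · simp [List.idxOf?_cons, hy]
      · have hyt : y ∈ t := by
          rcases List.mem_cons.mp h with h1 | h1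
          · exact absurd h1.symm hy
          · exact h1
        have hne : (a == y) = false := by simp [hy]
        simp [List.idxOf?_cons, List.idxOf_cons, hne, ih hyt]

theorem pv_map_range_take (s : List String) (m : Nat) (h : m ≤ s.length) :
    (List.range m).map (fun k => s.getD k "") = s.take m := by
  induction m with
  | zero => simp
  | succ k ih =>
      rw [List.range_succ, List.map_append, ih (by omega), List.take_add_one]
      simp [List.getD, List.getElem?_eq_getElem (by omega : k < s.length)]

theorem pv_insert_fst (amt : String → Int) (idx : String → Nat)
    (acc : List (String × Int × Nat)) (nm : String)
    (h1 : ∀ p ∈ acc, p.2.1 = amt p.1)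
    (h2 : ∀ p ∈ acc, p.2.2 < idx nm) :
    (PySem.List.insertBy
        (fun a b => decide (-a.2.1 < -b.2.1) || (!decide (-b.2.1 < -a.2.1) && decide (a.2.2 < b.2.2)))
        (nm, amt nm, idx nm) acc).map (·.1)
    = PySem.List.insertBy (fun a b => decide (-(amt a) < -(amt b))) nm (acc.map (·.1)) := by
  induction acc with
  | nil => rfl
  | cons p rest ih =>
      have hlt : ¬ idx nm < p.2.2 := by
        have := h2 p (List.mem_cons_self ..)
        omega
      have hp1 : p.2.1 = amt p.1 := h1 p (List.mem_cons_self ..)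
      simp only [PySem.List.insertBy, List.map_cons]
      have e1 : (decide (-(nm, amt nm, idx nm).2.1 < -p.2.1) ||
          (!decide (-p.2.1 < -(nm, amt nm, idx nm).2.1) && decide ((nm, amt nm, idx nm).2.2 < p.2.2)))
          = decide (-(amt nm) < -(amt p.1)) := by
        simp [hp1, hlt]
      beta_reduce
      rw [e1]
      by_cases hc : -(amt nm) < -(amt p.1)
      · rw [if_pos (by simpa using hc), if_pos (by simpa using hc)]
        simp
      · rw [if_neg (by simpa using hc), if_neg (by simpa using hc)]
        simp only [List.map_cons]
        rw [ih (fun q hq => h1 q (List.mem_cons_of_mem _ hq))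
            (fun q hq => h2 q (List.mem_cons_of_mem _ hq))]

theorem pv_fold_fst (amt : String → Int) (idx : String → Nat) :
    ∀ (ks : List String) (acc : List (String × Int × Nat)),
    (∀ p ∈ acc, p.2.1 = amt p.1) →
    (∀ p ∈ acc, ∀ k ∈ ks, p.2.2 < idx k) →
    ks.Pairwise (fun a b => idx a < idx b) →
    (ks.foldl (fun a nm =>
        PySem.List.insertBy
          (fun a b => decide (-a.2.1 < -b.2.1) || (!decide (-b.2.1 < -a.2.1) && decide (a.2.2 < b.2.2)))
          (nm, amt nm, idx nm) a) acc).map (·.1)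
    = ks.foldl (fun a nm => PySem.List.insertBy (fun a b => decide (-(amt a) < -(amt b))) nm a)
        (acc.map (·.1))
  | [], acc, _, _, _ => rfl
  | nm :: ks, acc, h1, h2, hpw => by
      rw [List.foldl_cons, List.foldl_cons,
        ← pv_insert_fst amt idx acc nm h1 (fun p hp => h2 p hp nm (List.mem_cons_self ..))]
      apply pv_fold_fst amt idx ks
      · intro p hp
        rcases (PySem.List.mem_insertBy _ _ _ _).mp hp with h | h
        · rw [h]
        · exact h1 p h
      · intro p hp k hk
        rcases (PySem.List.mem_insertBy _ _ _ _).mp hp with h | h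
        · rw [h]; exact (List.pairwise_cons.mp hpw).1 k hk
        · exact h2 p h k (List.mem_cons_of_mem _ hk)
      · exact (List.pairwise_cons.mp hpw).2

theorem pv_sorted2_fst (amt : String → Int) (idx : String → Nat) (ks : List String)
    (hpw : ks.Pairwise (fun a b => idx a < idx b)) :
    (PySem.List.sorted2 (ks.map fun nm => (nm, amt nm, idx nm))
        (fun p => -p.2.1) (fun p => p.2.2)).map (·.1)
    = PySem.List.sorted ks (fun nm => -(amt nm)) := by
  simp only [PySem.List.sorted2, PySem.List.sorted, if_neg (by decide : ¬ (false = true))]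
  rw [List.foldl_map]
  exact pv_fold_fst amt idx ks [] (by simp) (by simp) hpw

theorem pv_prefix_pairwise (t s : List String) (h : t <+: s) :
    (PySem.Set.ofList t).Pairwise
      (fun a b => (PySem.List.index? s a).getD 0 < (PySem.List.index? s b).getD 0) := by
  induction t using List.reverseRecOn with
  | nil => simp [PySem.Set.ofList]
  | append_singleton t a ih =>
      have ht : t <+: s := (t.prefix_append [a]).trans h
      have hofl : PySem.Set.ofList (t ++ [a]) = PySem.Set.add (PySem.Set.ofList t) a := by
        rw [PySem.Set.ofList_eq_foldl, List.foldl_append, ← PySem.Set.ofList_eq_foldl]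
        rfl
      rw [hofl]
      by_cases ha : a ∈ t
      · have hadd : (PySem.Set.ofList t).add a = PySem.Set.ofList t := by
          simp [PySem.Set.add, PySem.Set.mem_ofList, ha]
        rw [hadd]
        exact ih ht
      · have hadd : (PySem.Set.ofList t).add a = PySem.Set.ofList t ++ [a] := by
          simp [PySem.Set.add, PySem.Set.mem_ofList, ha]
        rw [hadd]
        rw [List.pairwise_append]
        refine ⟨ih ht, List.pairwise_singleton _ _, ?_⟩
        intro b hb a' ha'
        have ha'' : a' = a := by simpa using ha'
        rw [ha'']
        have hbt : b ∈ t := (PySem.Set.mem_ofList t b).mp hb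
        obtain ⟨u, hu⟩ := h
        have hs : s = t ++ (a :: u) := by rw [← hu]; simp
        have hbs : b ∈ s := by rw [hs]; exact List.mem_append_left _ hbt
        have has : a ∈ s := by rw [hs]; exact List.mem_append_right _ (List.mem_cons_self ..)
        show (List.idxOf? b s).getD 0 < (List.idxOf? a s).getD 0
        rw [pv_idxOf?_mem b s hbs, pv_idxOf?_mem a s has]
        simp only [Option.getD_some]
        rw [hs, List.idxOf_append_of_mem hbt, List.idxOf_append_of_notMem ha]
        have h1 : t.idxOf b < t.length := List.idxOf_lt_length_of_mem hbt
        simp only [List.idxOf_cons_self]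
        omega

-- ---- B-side: a stable sort by -total equals the concatenation of the per-total buckets
-- ---- taken in strictly descending total order.

theorem pv_flatMap_congr {α β : Type} {l : List α} {g h : α → List β}
    (hgh : ∀ t ∈ l, g t = h t) : l.flatMap g = l.flatMap h := by
  induction l with
  | nil => rfl
  | cons a t ih =>
      rw [List.flatMap_cons, List.flatMap_cons, hgh a (List.mem_cons_self ..),
        ih (fun b hb => hgh b (List.mem_cons_of_mem _ hb))]

theorem pv_insertBy_front {α : Type} (pred : α → α → Bool) (k : α) (l : List α)
    (h : ∀ b ∈ l, pred k b = true) : PySem.List.insertBy pred k l = k :: l := by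
  cases l with
  | nil => rfl
  | cons b t => simp [PySem.List.insertBy, h b (List.mem_cons_self ..)]

theorem pv_insertBy_skip {α : Type} (pred : α → α → Bool) (k : α) (l rest : List α)
    (h : ∀ b ∈ l, pred k b = false) :
    PySem.List.insertBy pred k (l ++ rest) = l ++ PySem.List.insertBy pred k rest := by
  induction l with
  | nil => rfl
  | cons b t ih =>
      simp only [List.cons_append, PySem.List.insertBy, h b (List.mem_cons_self ..),
        Bool.false_eq_true, if_false]
      rw [ih (fun c hc => h c (List.mem_cons_of_mem _ hc))]

theorem pv_insertBy_flatMap (f : String → Int) (k : String) (ts : List Int) :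
    ∀ (B : Int → List String), ts.Pairwise (fun a b => b < a) → f k ∈ ts →
    (∀ t ∈ ts, ∀ a ∈ B t, f a = t) →
    PySem.List.insertBy (fun a b => decide (f b < f a)) k (ts.flatMap B)
      = ts.flatMap (fun t => if t = f k then B t ++ [k] else B t) := by
  induction ts with
  | nil => intro B _ hk _; simp at hk
  | cons t ts' ih =>
      intro B hpw hk hB
      obtain ⟨hlt, hpw'⟩ := List.pairwise_cons.mp hpw
      rw [List.flatMap_cons, List.flatMap_cons]
      by_cases hkt : f k = t
      · have hskip : ∀ b ∈ B t, (fun a b => decide (f b < f a)) k b = false := by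
          intro b hb
          have hb' := hB t (List.mem_cons_self ..) b hb
          simp [hb', hkt]
        rw [pv_insertBy_skip _ _ _ _ hskip]
        have hfront : ∀ b ∈ ts'.flatMap B, (fun a b => decide (f b < f a)) k b = true := by
          intro b hb
          obtain ⟨t', ht', hbt'⟩ := List.mem_flatMap.mp hb
          have h1 : f b = t' := hB t' (List.mem_cons_of_mem _ ht') b hbt'
          have h2 : t' < t := hlt t' ht'
          simp only [decide_eq_true_eq, h1, hkt]
          omega
        rw [pv_insertBy_front _ _ _ hfront, if_pos hkt.symm]
        have hrest : ts'.flatMap (fun t' => if t' = f k then B t' ++ [k] else B t')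
            = ts'.flatMap B := by
          apply pv_flatMap_congr
          intro t' ht'
          have : t' < t := hlt t' ht'
          rw [if_neg (by omega : ¬ t' = f k)]
        rw [hrest]
        simp
      · have hk' : f k ∈ ts' := by
          rcases List.mem_cons.mp hk with h | h
          · exact absurd h hkt
          · exact h
        have hklt : f k < t := hlt _ hk'
        have hskip : ∀ b ∈ B t, (fun a b => decide (f b < f a)) k b = false := by
          intro b hb
          have hb' := hB t (List.mem_cons_self ..) b hb
          simp only [decide_eq_false_iff_not, hb']
          omega
        rw [pv_insertBy_skip _ _ _ _ hskip,
          ih B hpw' hk' (fun t' ht' => hB t' (List.mem_cons_of_mem _ ht')),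
          if_neg (fun h => hkt h.symm)]

theorem pv_sorted_buckets (f : String → Int) (ts : List Int)
    (hts : ts.Pairwise (fun a b => b < a)) :
    ∀ (ks : List String), (∀ y ∈ ks, f y ∈ ts) →
    PySem.List.sorted ks (fun y => -(f y))
      = ts.flatMap (fun t => ks.filter (fun y => f y == t)) := by
  intro ks
  induction ks using List.reverseRecOn with
  | nil =>
      intro _
      rw [PySem.List.sorted_eq_foldl_insertBy]
      simp
  | append_singleton ks k ih =>
      intro hmem
      rw [PySem.List.sorted_eq_foldl_insertBy, List.foldl_append, List.foldl_cons, List.foldl_nil,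
        ← PySem.List.sorted_eq_foldl_insertBy]
      have hpredeq : (fun (a b : String) => decide (-(f a) < -(f b)))
          = (fun a b => decide (f b < f a)) := by
        funext a b
        simp
      rw [hpredeq, ih (fun y hy => hmem y (List.mem_append_left _ hy)),
        pv_insertBy_flatMap f k ts _ hts (hmem k (List.mem_append_right _ (List.mem_cons_self ..)))
          (fun t _ a ha => by simpa using (List.mem_filter.mp ha).2)]
      apply pv_flatMap_congr
      intro t _
      rw [List.filter_append]
      by_cases h : t = f k
      · rw [if_pos h]
        simp [List.filter, h]
      · rw [if_neg h]
        have hfk : (f k == t) = false := by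
          simp only [beq_eq_false_iff_ne]
          exact fun hh => h hh.symm
        simp [List.filter, hfk]

theorem pv_alt_eq_sorted (T : PySem.Dict String Int) (hnd : T.keys.Nodup) :
    (PySem.List.sorted (T.items.foldl (fun b p =>
        b.modify p.2 ([] : List String) (fun l => l ++ [p.1])) PySem.Dict.empty).keys
        (fun t => t) true).flatMap
      (fun t => (T.items.foldl (fun b p =>
        b.modify p.2 ([] : List String) (fun l => l ++ [p.1])) PySem.Dict.empty).getD t [])
    = PySem.List.sorted T.keys (fun nm => -(T.getD nm 0)) := by
  have hitems : T.items = T.keys.map (fun kk => (kk, T.getD kk 0)) :=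
    PySem.Dict.items_eq_map_keys T hnd 0
  have hget : ∀ c, (T.items.foldl (fun b p =>
      b.modify p.2 ([] : List String) (fun l => l ++ [p.1])) PySem.Dict.empty).getD c []
      = T.keys.filter (fun nm => T.getD nm 0 == c) := by
    intro c
    have h1 : T.items.foldl (fun b p =>
        b.modify p.2 ([] : List String) (fun l => l ++ [p.1])) PySem.Dict.empty
        = (T.items.map (fun p => (p.2, p.1))).foldl (fun b q =>
            b.modify q.1 ([] : List String) (fun l => l ++ [q.2])) PySem.Dict.empty := by
      rw [List.foldl_map]
    rw [h1, PySem.Dict.getD_foldl_modify_append, PySem.Dict.getD_empty, hitems]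
    simp [List.filter_map, List.map_map, Function.comp_def]
  have hkeys : (T.items.foldl (fun b p =>
      b.modify p.2 ([] : List String) (fun l => l ++ [p.1])) PySem.Dict.empty).keys
      = PySem.Set.ofList (T.keys.map (fun kk => T.getD kk 0)) := by
    rw [PySem.Dict.keys_foldl_modify_key T.items (fun p => p.2) ([] : List String)
      (fun _ p => (fun l => l ++ [p.1])) PySem.Dict.empty]
    rw [PySem.Dict.keys_empty, PySem.Set.ofList_eq_foldl, hitems]
    rw [List.map_map]
    rfl
  have hperm := PySem.List.sorted_perm (T.items.foldl (fun b p =>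
      b.modify p.2 ([] : List String) (fun l => l ++ [p.1])) PySem.Dict.empty).keys
      (fun t => t) true
  have hndk : (T.items.foldl (fun b p =>
      b.modify p.2 ([] : List String) (fun l => l ++ [p.1])) PySem.Dict.empty).keys.Nodup := by
    rw [hkeys]
    exact PySem.Set.nodup_ofList _
  have hndt := hperm.symm.nodup hndk
  have hle := PySem.List.sorted_pairwise_rev (T.items.foldl (fun b p =>
      b.modify p.2 ([] : List String) (fun l => l ++ [p.1])) PySem.Dict.empty).keys (fun t => t)
  have hgt : (PySem.List.sorted (T.items.foldl (fun b p =>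
      b.modify p.2 ([] : List String) (fun l => l ++ [p.1])) PySem.Dict.empty).keys
      (fun t => t) true).Pairwise (fun a b => b < a) :=
    (hle.and hndt).imp (fun hab => lt_of_le_of_ne hab.1 (Ne.symm hab.2))
  have hmem : ∀ nm ∈ T.keys, T.getD nm 0 ∈ PySem.List.sorted (T.items.foldl (fun b p =>
      b.modify p.2 ([] : List String) (fun l => l ++ [p.1])) PySem.Dict.empty).keys
      (fun t => t) true := by
    intro nm hnm
    rw [PySem.List.mem_sorted, hkeys, PySem.Set.mem_ofList]
    exact List.mem_map_of_mem hnm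
  rw [pv_flatMap_congr (fun c _ => hget c)]
  exact (pv_sorted_buckets (fun nm => T.getD nm 0) _ hgt T.keys hmem).symm

-- ===== VERDICT (by name: the statement is the Claim_ definition above) =====
theorem solution_spec : Claim_equal_solution := by
  intro n s x _ hPre
  unfold Spec_solution solution solution_alt
  have hfun : (fun (d : PySem.Dict String Int) (i : Int) =>
      let name := PySem.List.pyGetD s i ""
      let amount := PySem.List.pyGetD x i 0
      if d.contains name then d.modify name 0 (· + amount) else d.insert name amount)
      = (fun (d : PySem.Dict String Int) (i : Int) =>
      d.insert (PySem.List.pyGetD s i "")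
        (d.getD (PySem.List.pyGetD s i "") 0 + PySem.List.pyGetD x i 0)) := by
    funext d i
    by_cases hc : d.contains (PySem.List.pyGetD s i "")
    · simp [hc, PySem.Dict.modify]
    · rw [PySem.Dict.getD_of_not_contains _ 0 (by simpa using hc), zero_add]
      simp [hc]
  rw [hfun]
  have hkeys : ((PySem.List.pyRange 0 n).foldl (fun d i =>
      d.insert (PySem.List.pyGetD s i "")
        (d.getD (PySem.List.pyGetD s i "") 0 + PySem.List.pyGetD x i 0))
      (PySem.Dict.empty : PySem.Dict String Int)).keys
      = PySem.Set.ofList ((PySem.List.pyRange 0 n).map (fun i => PySem.List.pyGetD s i "")) := by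
    rw [PySem.Dict.keys_foldl_insert_key (PySem.List.pyRange 0 n)
      (fun i => PySem.List.pyGetD s i "")
      (fun d i => d.getD (PySem.List.pyGetD s i "") 0 + PySem.List.pyGetD x i 0)
      PySem.Dict.empty]
    rw [PySem.Dict.keys_empty, PySem.Set.ofList_eq_foldl]
    rfl
  have hnames : ∃ t, t <+: s ∧
      ((PySem.List.pyRange 0 n).map (fun i => PySem.List.pyGetD s i "")) = t := by
    by_cases hn : n ≤ 0
    · refine ⟨[], List.nil_prefix, ?_⟩
      have : PySem.List.pyRange 0 n = [] := by
        simp [PySem.List.pyRange]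
        omega
      simp [this]
    · refine ⟨s.take n.toNat, List.take_prefix _ s, ?_⟩
      have hm : n = (n.toNat : Int) := by omega
      rw [hm, PySem.List.pyRange_zero_natCast, List.map_map]
      have hcomp : ((fun i => PySem.List.pyGetD s i "") ∘ fun k : Nat => (k : Int))
          = fun k : Nat => s.getD k "" := by
        funext k
        simp [PySem.List.pyGetD_natCast]
      rw [hcomp]
      exact pv_map_range_take s n.toNat (by have := hPre.1; omega)
  obtain ⟨t, hts, htn⟩ := hnames
  have hpw := pv_prefix_pairwise t s hts
  rw [← htn] at hpw
  rw [← hkeys] at hpw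
  have hnd : ((PySem.List.pyRange 0 n).foldl (fun d i =>
      d.insert (PySem.List.pyGetD s i "")
        (d.getD (PySem.List.pyGetD s i "") 0 + PySem.List.pyGetD x i 0))
      (PySem.Dict.empty : PySem.Dict String Int)).keys.Nodup := by
    rw [hkeys]
    exact PySem.Set.nodup_ofList _
  exact (pv_sorted2_fst _ _ _ hpw).trans (pv_alt_eq_sorted _ hnd).symm
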